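-- pv_equiv track=rewrite | github.com/ljk53/upytorch | esp32/display/fbconsole.py | _esq_read_num
-- ===== SOURCE A (Python) =====
-- def _esq_read_num(buf, pos):
--     digit = 1
--     n = 0
--     while buf[pos] != 0x5b:
--         n += digit * (buf[pos] - 0x30)
--         pos -= 1
--         digit *= 10
--     return n
-- ===== SOURCE B (Python) =====
-- def _esq_read_num(buf, pos):
--     # locate the '[' marker scanning backward (same index sequence as A),
--     # then parse the digits forward with Horner's method
--     i = pos
--     while buf[i] != 0x5b:
--         i -= 1
--     n = 0
--     for j in range(i + 1, pos + 1):
--         n = n * 10 + (buf[j] - 0x30)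
--     return n
-- ===== Notes on version B (the rewrite author's own statement) =====
-- stated objective: alternative
-- what changed: Replaces A's single backward pass that maintains a growing place-value multiplier with a locate-then-parse structure: first find the '[' marker scanning backward, then build the number forward with Horner's method (n = n*10 + digit), no multiplier state.
import Mathlib
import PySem

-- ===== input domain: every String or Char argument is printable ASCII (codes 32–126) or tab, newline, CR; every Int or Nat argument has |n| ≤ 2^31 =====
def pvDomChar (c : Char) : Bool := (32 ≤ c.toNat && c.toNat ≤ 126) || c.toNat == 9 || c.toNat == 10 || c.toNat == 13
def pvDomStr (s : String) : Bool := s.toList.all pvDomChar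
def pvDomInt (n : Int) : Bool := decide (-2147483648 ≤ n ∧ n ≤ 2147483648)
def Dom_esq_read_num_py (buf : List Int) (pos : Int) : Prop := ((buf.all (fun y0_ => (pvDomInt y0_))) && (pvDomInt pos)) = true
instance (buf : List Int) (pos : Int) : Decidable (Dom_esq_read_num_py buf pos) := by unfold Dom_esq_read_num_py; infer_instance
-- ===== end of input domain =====

-- B differs from A by structure: locate the '[' marker first, then parse forward (Horner);
-- A makes one backward pass maintaining a place-value multiplier.

-- ===== PORT A =====
-- A's while loop: n += digit*(buf[pos]-0x30); pos -= 1; digit *= 10.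
-- pyGet? none = IndexError (A raises there; excluded by Pre_).
def esqLoopA (buf : List Int) (pos digit n : Int) : Int :=
  match h : PySem.List.pyGet? buf pos with
  | none => n
  | some c =>
    if c = 0x5b then n
    else esqLoopA buf (pos - 1) (digit * 10) (n + digit * (c - 0x30))
termination_by (pos + buf.length + 1).toNat
decreasing_by
  have := PySem.List.pyGet?_eq_none_iff (xs := buf) (i := pos)
  simp [h] at this
  unfold PySem.Raise.InRange at this
  omega

def esq_read_num_py (buf : List Int) (pos : Int) : Int :=
  esqLoopA buf pos 1 0

-- ===== PORT B =====
-- Source B's first loop: scan backward for the '[' marker; none = IndexError (excluded by Pre_).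
def esqFindMark (buf : List Int) (pos : Int) : Option Int :=
  match h : PySem.List.pyGet? buf pos with
  | none => none
  | some c => if c = 0x5b then some pos else esqFindMark buf (pos - 1)
termination_by (pos + buf.length + 1).toNat
decreasing_by
  have := PySem.List.pyGet?_eq_none_iff (xs := buf) (i := pos)
  simp [h] at this
  unfold PySem.Raise.InRange at this
  omega

-- Source B's second loop: for j in range(i+1, pos+1): n = n*10 + (buf[j]-0x30)
def esqHorner (buf : List Int) (j stop n : Int) : Int :=
  if stop < j then n
  else
    match PySem.List.pyGet? buf j with
    | none => n  -- IndexError; unreachable under Pre_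
    | some c => esqHorner buf (j + 1) stop (n * 10 + (c - 0x30))
termination_by (stop + 1 - j).toNat
decreasing_by omega

def esq_read_num_py_alt (buf : List Int) (pos : Int) : Int :=
  match esqFindMark buf pos with
  | none => 0  -- IndexError in Source B; unreachable under Pre_
  | some m => esqHorner buf (m + 1) pos 0

-- ===== PRECONDITION & SPEC =====
-- Pre_ = exactly the inputs on which A's backward scan reaches a '[' before running off the
-- buffer (otherwise both programs raise IndexError): pos is a valid Python index and some
-- index in the scanned range pos, pos-1, …, -len holds 0x5b.
def Pre_esq_read_num_py (buf : List Int) (pos : Int) : Prop :=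
  pos < buf.length ∧
  ∃ k ∈ List.range (pos + buf.length + 1).toNat,
    PySem.List.pyGet? buf (pos - k) = some 0x5b
instance (buf : List Int) (pos : Int) : Decidable (Pre_esq_read_num_py buf pos) := by
  unfold Pre_esq_read_num_py; infer_instance

def pvWitness_esq_read_num_py : List Int × Int := ([0x5b, 0x31, 0x32], 2)

def Spec_esq_read_num_py (buf : List Int) (pos : Int) (out : Int) : Prop := out = esq_read_num_py_alt buf pos
instance (buf : List Int) (pos : Int) (out : Int) : Decidable (Spec_esq_read_num_py buf pos out) := by unfold Spec_esq_read_num_py; infer_instance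

-- ===== CLAIM (what is proved, stated in full; the proofs are below) =====
def Claim_equal_esq_read_num_py : Prop := ∀ (buf : List Int) (pos : Int), Dom_esq_read_num_py buf pos → Pre_esq_read_num_py buf pos → Spec_esq_read_num_py buf pos (esq_read_num_py buf pos)

-- ===== LEMMAS AND PROOFS =====

theorem esq_pyGet_some_bounds (buf : List Int) (p c : Int)
    (h : PySem.List.pyGet? buf p = some c) : -(buf.length : Int) ≤ p ∧ p < buf.length := by
  have := PySem.List.pyGet?_eq_none_iff (xs := buf) (i := p)
  simp [h] at this
  unfold PySem.Raise.InRange at this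
  omega

theorem esqFindMark_le (buf : List Int) : ∀ (p m : Int), esqFindMark buf p = some m → m ≤ p := by
  have key : ∀ f : Nat, ∀ p m : Int, (p + buf.length + 1).toNat ≤ f →
      esqFindMark buf p = some m → m ≤ p := by
    intro f
    induction f with
    | zero =>
      intro p m hf h
      rw [esqFindMark.eq_def] at h
      split at h
      · exact absurd h (by simp)
      · rename_i c hg
        have hb := esq_pyGet_some_bounds buf p c hg
        omega
    | succ f ih =>
      intro p m hf h
      rw [esqFindMark.eq_def] at h
      split at h
      · exact absurd h (by simp)
      · rename_i c hg
        have hb := esq_pyGet_some_bounds buf p c hg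
        split at h
        · injection h with h; omega
        · have := ih (p - 1) m (by omega) h
          omega
  intro p m h
  exact key (p + buf.length + 1).toNat p m le_rfl h

theorem esqFindMark_valid (buf : List Int) : ∀ (p m : Int), esqFindMark buf p = some m →
    ∀ j, m ≤ j → j ≤ p → (PySem.List.pyGet? buf j).isSome := by
  have key : ∀ f : Nat, ∀ p m : Int, (p + buf.length + 1).toNat ≤ f →
      esqFindMark buf p = some m →
      ∀ j, m ≤ j → j ≤ p → (PySem.List.pyGet? buf j).isSome := by
    intro f
    induction f with
    | zero =>
      intro p m hf h
      rw [esqFindMark.eq_def] at h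
      split at h
      · exact absurd h (by simp)
      · rename_i c hg
        have hb := esq_pyGet_some_bounds buf p c hg
        omega
    | succ f ih =>
      intro p m hf h j hmj hjp
      rw [esqFindMark.eq_def] at h
      split at h
      · exact absurd h (by simp)
      · rename_i c hg
        have hb := esq_pyGet_some_bounds buf p c hg
        split at h
        · injection h with h
          have : j = p := by omega
          subst this; simp [hg]
        · rcases eq_or_lt_of_le hjp with rfl | hlt
          · simp [hg]
          · exact ih (p - 1) m (by omega) h j hmj (by omega)
  intro p m h
  exact key (p + buf.length + 1).toNat p m le_rfl h

theorem esqHorner_peel (buf : List Int) : ∀ (pi : Nat) (p i : Int) (c : Int), (p - i).toNat = pi → i ≤ p →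
    PySem.List.pyGet? buf p = some c →
    (∀ j, i ≤ j → j < p → (PySem.List.pyGet? buf j).isSome) →
    ∀ n, esqHorner buf i p n = esqHorner buf i (p - 1) n * 10 + (c - 0x30) := by
  intro pi
  induction pi with
  | zero =>
    intro p i c hpi hip hg _ n
    have hip' : i = p := by omega
    subst hip'
    rw [esqHorner.eq_def]
    rw [if_neg (by omega : ¬ i < i)]
    simp only [hg]
    rw [esqHorner.eq_def]
    rw [if_pos (by omega : i < i + 1)]
    rw [esqHorner.eq_def]
    rw [if_pos (by omega : i - 1 < i)]
  | succ pi ih =>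
    intro p i c hpi hip hg hv n
    have hiplt : i < p := by omega
    obtain ⟨ci, hgi⟩ := Option.isSome_iff_exists.mp (hv i le_rfl hiplt)
    rw [esqHorner.eq_def]
    rw [if_neg (by omega : ¬ p < i)]
    simp only [hgi]
    rw [ih p (i+1) c (by omega) (by omega) hg (fun j h1 h2 => hv j (by omega) h2)]
    conv_rhs => rw [esqHorner.eq_def]
    rw [if_neg (by omega : ¬ p - 1 < i)]
    simp only [hgi]

theorem esqLoopA_eq (buf : List Int) : ∀ (p m : Int), esqFindMark buf p = some m →
    ∀ digit n, esqLoopA buf p digit n = n + digit * esqHorner buf (m + 1) p 0 := by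
  have key : ∀ f : Nat, ∀ p m : Int, (p + buf.length + 1).toNat ≤ f →
      esqFindMark buf p = some m →
      ∀ digit n, esqLoopA buf p digit n = n + digit * esqHorner buf (m + 1) p 0 := by
    intro f
    induction f with
    | zero =>
      intro p m hf h
      rw [esqFindMark.eq_def] at h
      split at h
      · exact absurd h (by simp)
      · rename_i c hg
        have hb := esq_pyGet_some_bounds buf p c hg
        omega
    | succ f ih =>
      intro p m hf h digit n
      have hcopy := h
      rw [esqFindMark.eq_def] at h
      split at h
      · exact absurd h (by simp)
      · rename_i c hg
        have hb := esq_pyGet_some_bounds buf p c hg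
        rw [esqLoopA.eq_def]
        split
        · rename_i hg2
          rw [hg] at hg2; exact absurd hg2 (by simp)
        · rename_i c2 hg2
          rw [hg] at hg2
          injection hg2 with hg2
          subst hg2
          split at h
          · rename_i hc
            injection h with h
            subst h
            rw [if_pos hc]
            rw [esqHorner.eq_def]
            rw [if_pos (by omega : p < p + 1)]
            ring
          · rename_i hc
            rw [if_neg hc]
            have hmle := esqFindMark_le buf (p - 1) m h
            rw [ih (p - 1) m (by omega) h (digit * 10) (n + digit * (c - 0x30))]
            have hpeel := esqHorner_peel buf (p - (m + 1)).toNat p (m + 1) c rfl (by omega) hg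
              (fun j h1 h2 => esqFindMark_valid buf p m hcopy j (by omega) (by omega)) 0
            rw [hpeel]
            ring
  intro p m h
  exact key (p + buf.length + 1).toNat p m le_rfl h

theorem pre_findMark (buf : List Int) : ∀ (p : Int), Pre_esq_read_num_py buf p →
    ∃ m, esqFindMark buf p = some m := by
  have key : ∀ f : Nat, ∀ p : Int, (p + buf.length + 1).toNat ≤ f →
      p < buf.length →
      (∃ k ∈ List.range (p + buf.length + 1).toNat, PySem.List.pyGet? buf (p - k) = some 0x5b) →
      ∃ m, esqFindMark buf p = some m := by
    intro f
    induction f with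
    | zero =>
      intro p hf hlt hex
      obtain ⟨k, hk, hg⟩ := hex
      simp [List.mem_range] at hk
      omega
    | succ f ih =>
      intro p hf hlt hex
      obtain ⟨k, hk, hgk⟩ := hex
      simp only [List.mem_range] at hk
      have hbk := esq_pyGet_some_bounds buf (p - k) 0x5b hgk
      have hk0 : 0 ≤ (k : Int) := by positivity
      have hgp : (PySem.List.pyGet? buf p).isSome := by
        rcases hcase : PySem.List.pyGet? buf p with _ | c
        · have hni := (PySem.List.pyGet?_eq_none_iff (xs := buf) (i := p)).mp hcase
          unfold PySem.Raise.InRange at hni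
          push Not at hni
          omega
        · simp
      obtain ⟨c, hg⟩ := Option.isSome_iff_exists.mp hgp
      rw [esqFindMark.eq_def]
      split
      · rename_i hg2
        rw [hg] at hg2; exact absurd hg2 (by simp)
      · rename_i c2 hg2
        rw [hg] at hg2
        injection hg2 with hg2
        subst hg2
        by_cases hc : c = 0x5b
        · rw [if_pos hc]; exact ⟨p, rfl⟩
        · rw [if_neg hc]
          have hkne : k ≠ 0 := by
            intro h0; subst h0
            simp only [Nat.cast_zero, sub_zero] at hgk
            rw [hg] at hgk
            exact hc (by injection hgk)
          refine ih (p - 1) (by omega) (by omega) ⟨k - 1, ?_, ?_⟩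
          · simp only [List.mem_range]; omega
          · have hcast : p - 1 - ((k - 1 : Nat) : Int) = p - (k : Int) := by omega
            rw [hcast]; exact hgk
  intro p hp
  obtain ⟨hlt, hex⟩ := hp
  exact key (p + buf.length + 1).toNat p le_rfl hlt hex

-- ===== VERDICT (by name: the statement is the Claim_ definition above) =====
theorem esq_read_num_py_spec : Claim_equal_esq_read_num_py := by
  intro buf pos _ hpre
  obtain ⟨m, hm⟩ := pre_findMark buf pos hpre
  unfold Spec_esq_read_num_py esq_read_num_py esq_read_num_py_alt
  rw [hm, esqLoopA_eq buf pos m hm 1 0]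
  ring
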